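-- pv_equiv track=rewrite | github.com/kudinov-fedor/python-core-training | obalk/checkio/initiation/zeros_end.py | end_zeros
-- ===== SOURCE A (Python) =====
-- def end_zeros(number: int) -> int:
--     count = 0
--     for number in str(number)[-1::-1]:
--         if number == "0":
--             count += 1
--         else:
--             break
--     return count
-- ===== SOURCE B (Python) =====
-- def end_zeros(number: int) -> int:
--     if number == 0:
--         return 1
--     n = abs(number)
--     count = 0
--     while n != 0 and n % 10 == 0:
--         count += 1
--         n //= 10
--     return count
-- ===== Notes on version B (the rewrite author's own statement) =====
-- stated objective: alternative
-- what changed: Replaces str-conversion and a reversed character scan with pure integer arithmetic: repeatedly divide abs(number) by 10 while the last digit is 0 (0 itself has the one zero digit of its decimal representation).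
import Mathlib
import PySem

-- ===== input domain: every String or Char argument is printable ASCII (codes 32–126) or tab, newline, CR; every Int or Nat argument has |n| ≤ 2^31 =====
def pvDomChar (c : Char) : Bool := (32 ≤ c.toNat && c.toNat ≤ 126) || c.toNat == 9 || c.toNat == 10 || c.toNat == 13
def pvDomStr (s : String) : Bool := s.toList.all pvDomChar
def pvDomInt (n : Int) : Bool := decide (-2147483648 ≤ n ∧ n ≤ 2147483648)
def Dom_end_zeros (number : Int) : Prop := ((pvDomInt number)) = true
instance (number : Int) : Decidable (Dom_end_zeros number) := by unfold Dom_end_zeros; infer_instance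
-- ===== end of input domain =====

-- B replaces the string conversion and reversed character scan by arithmetic on abs(number):
-- repeatedly strip trailing zero digits with % 10 and // 10 (0's decimal string has one zero digit).

-- ===== PORT A =====
-- the 'for … break' loop over str(number)[-1::-1]
def azLoop (cs : List Char) (count : Int) : Int :=
  match cs with
  | [] => count
  | c :: rest => if c = '0' then azLoop rest (count + 1) else count

def end_zeros (number : Int) : Int :=
  -- str(number)[-1::-1]: step = -1 ≠ 0, so slice? never returns none; getD [] is exact
  azLoop ((PySem.List.slice? (PySem.Int.toChars number) (some (-1)) none (-1)).getD []) 0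

-- ===== PORT B =====
-- the 'while n != 0 and n % 10 == 0' loop of Source B
def bzLoop (n : Nat) (count : Int) : Int :=
  if n ≠ 0 ∧ n % 10 = 0 then bzLoop (n / 10) (count + 1) else count
termination_by n
decreasing_by exact Nat.div_lt_self (Nat.pos_of_ne_zero (by omega)) (by omega)

def end_zeros_alt (number : Int) : Int :=
  if number = 0 then 1 else bzLoop number.natAbs 0

-- ===== PRECONDITION & SPEC =====
def Spec_end_zeros (number : Int) (out : Int) : Prop := out = end_zeros_alt number
instance (number : Int) (out : Int) : Decidable (Spec_end_zeros number out) := by unfold Spec_end_zeros; infer_instance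

-- ===== CLAIM (what is proved, stated in full; the proofs are below) =====
def Claim_equal_end_zeros : Prop := ∀ (number : Int), Dom_end_zeros number → Spec_end_zeros number (end_zeros number)

-- ===== LEMMAS AND PROOFS =====

-- xs[-1::-1] coincides with xs[::-1]: the start index -1 clamps to the default for a negative step
theorem slice_neg_one_start_rev {α : Type} (xs : List α) :
    PySem.List.slice? xs (some (-1)) none (-1) = some xs.reverse := by
  have h : PySem.List.sliceIndices xs.length (some (-1)) none (-1)
      = PySem.List.sliceIndices xs.length none none (-1) := by
    simp [PySem.List.sliceIndices]; omega
  have h2 := PySem.List.slice?_none_none_neg_one (xs := xs)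
  simp only [PySem.List.slice?, h] at *
  exact h2

theorem digitChar_eq_zero_iff (k : Nat) (h : k < 10) : Nat.digitChar k = '0' ↔ k = 0 := by
  interval_cases k <;> simp [Nat.digitChar]

theorem tdc_append (f : Nat) : ∀ (n : Nat) (l : List Char),
    Nat.toDigitsCore 10 f n l = Nat.toDigitsCore 10 f n [] ++ l := by
  induction f with
  | zero => intro n l; rfl
  | succ f ih =>
    intro n l
    simp only [Nat.toDigitsCore]
    by_cases hd : n / 10 = 0
    · simp [hd]
    · simp only [hd, if_false]
      rw [ih (n / 10) (Nat.digitChar (n % 10) :: l), ih (n / 10) [Nat.digitChar (n % 10)]]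
      simp

theorem key_loop (f : Nat) : ∀ (n : Nat) (c : Int) (tail : List Char), 0 < n → n < f →
    azLoop ((Nat.toDigitsCore 10 f n []).reverse ++ tail) c = bzLoop n c := by
  induction f with
  | zero => intro n c tail hn hf; omega
  | succ f ih =>
    intro n c tail hn hf
    have hmod : n % 10 < 10 := Nat.mod_lt _ (by omega)
    simp only [Nat.toDigitsCore]
    by_cases hd : n / 10 = 0
    · -- single digit; it is nonzero (else n = 0)
      have hm : n % 10 ≠ 0 := by omega
      simp only [hd, if_true, List.reverse_cons, List.reverse_nil, List.nil_append,
        List.cons_append, azLoop]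
      rw [if_neg (by simpa using (fun h => hm ((digitChar_eq_zero_iff _ hmod).mp h)))]
      rw [bzLoop]
      simp [hm]
    · simp only [hd, if_false]
      rw [tdc_append]
      simp only [List.reverse_append, List.reverse_cons, List.reverse_nil, List.nil_append,
        List.cons_append, azLoop]
      by_cases hm : n % 10 = 0
      · rw [if_pos (by rw [hm]; rfl)]
        rw [ih (n / 10) (c + 1) tail (Nat.pos_of_ne_zero hd)
          (by have := Nat.div_lt_self hn (by omega : 1 < 10); omega)]
        conv_rhs => rw [bzLoop, if_pos ⟨by omega, hm⟩]
      · rw [if_neg (by simpa using (fun h => hm ((digitChar_eq_zero_iff _ hmod).mp h)))]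
        rw [bzLoop]
        simp [hm]

-- ===== VERDICT (by name: the statement is the Claim_ definition above) =====
theorem end_zeros_spec : Claim_equal_end_zeros := by
  intro number _
  unfold Spec_end_zeros end_zeros
  rw [slice_neg_one_start_rev]
  simp only [Option.getD_some]
  rcases lt_trichotomy number 0 with hneg | hz | hpos
  · have hne : number ≠ 0 := by omega
    simp only [PySem.Int.toChars, if_pos hneg, List.reverse_cons, end_zeros_alt, if_neg hne]
    have hpos' : 0 < number.natAbs := by omega
    exact key_loop (number.natAbs + 1) number.natAbs 0 ['-'] hpos' (by omega)
  · subst hz; decide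
  · have hne : number ≠ 0 := by omega
    have htn : number.toNat = number.natAbs := by omega
    simp only [PySem.Int.toChars, if_neg (by omega : ¬ number < 0), end_zeros_alt, if_neg hne, htn]
    have := key_loop (number.natAbs + 1) number.natAbs 0 [] (by omega) (by omega)
    simpa using this
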